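-- pv_equiv track=rewrite | github.com/miliar/Code_Jam_Webscraper | solutions_python/solutions_year17_round0_nr1/2410.py | solve
-- ===== SOURCE A (Python) =====
-- def solve(S, K):
--     r = 0
--     while len(S) >= K:
--         if S[0] == '-':
--             r += 1
--             for i in range(K):
--                 S[i] = '+' if S[i] == '-' else '-'
--
--         if '-' not in S: return r
--         S = S[S.index('-'):]
--     return None if '-' in S else r
-- ===== SOURCE B (Python) =====
-- def solve(S, K):
--     # Single left-to-right pass: active flip windows are tracked as a queue of
--     # expiry indices (list + head pointer), so each position is decided from
--     # the parity of active windows instead of re-flipping/re-scanning the list.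
--     n = len(S)
--     pending = []   # expiry indices of flips still possibly active, in order
--     start = 0      # queue head pointer
--     r = 0
--     for i in range(n):
--         if start < len(pending) and pending[start] == i:
--             start += 1
--         flipped = (len(pending) - start) % 2 == 1
--         if (S[i] == '-') != flipped:
--             if i + K > n:
--                 return None
--             pending.append(i + K)
--             r += 1
--     return r
-- ===== Notes on version B (the rewrite author's own statement) =====
-- stated objective: alternative
-- what changed: Replaces A's repeated in-place re-flip of K elements plus repeated 'in'/'index' rescans of the shrinking list by a single left-to-right pass that tracks the parity of active flip windows with a queue of expiry indices.
import Mathlib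
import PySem

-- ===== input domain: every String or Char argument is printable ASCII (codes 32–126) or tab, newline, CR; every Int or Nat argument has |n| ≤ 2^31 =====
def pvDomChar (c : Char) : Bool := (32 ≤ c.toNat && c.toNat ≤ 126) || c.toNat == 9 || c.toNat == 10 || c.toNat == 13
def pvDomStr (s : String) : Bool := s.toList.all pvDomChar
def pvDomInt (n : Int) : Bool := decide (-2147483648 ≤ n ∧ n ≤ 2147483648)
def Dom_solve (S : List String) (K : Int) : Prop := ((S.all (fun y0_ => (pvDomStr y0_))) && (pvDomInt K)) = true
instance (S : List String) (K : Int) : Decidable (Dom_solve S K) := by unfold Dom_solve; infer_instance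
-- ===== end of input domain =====

-- B replaces A's repeated in-place re-flipping and rescanning of the shrinking list by a
-- single left-to-right pass tracking flip-window parity with a queue of expiry indices
-- (a different algorithm); A mutates its argument list in Python, B does not — the
-- equivalence proved here is about the RETURN value only.

-- ===== PORT A =====
-- pyGetD/pySetD are the total forms of S[0]/S[i]=…; the indices are in range whenever Pre_solve holds.
def flipPrefix (S : List String) (K : Int) : List String :=
  (PySem.List.pyRange 0 K 1).foldl
    (fun acc i => PySem.List.pySetD acc i (if PySem.List.pyGetD acc i "" = "-" then "+" else "-")) S

def solveLoop (K : Int) : Nat → List String → Int → Option Int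
  | 0, _S, _r => none   -- fuel exhausted: unreachable under Pre_solve (the while loop runs at most len(S)+1 times there)
  | fuel + 1, S, r =>
    if K ≤ (S.length : Int) then
      let p := if PySem.List.pyGetD S 0 "" = "-" then (r + 1, flipPrefix S K) else (r, S)
      if "-" ∉ p.2 then some p.1
      else
        match PySem.List.index? p.2 "-" with
        | some j => solveLoop K fuel (PySem.List.slice p.2 (some (j : Int)) none) p.1
        | none => none   -- unreachable: "-" ∈ p.2 was just checked
    else if "-" ∈ S then none else some r

def solve (S : List String) (K : Int) : Option Int := solveLoop K (S.length + 1) S 0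

-- ===== PORT B =====
def altLoop (S : List String) (K : Int) (n : Nat) : Nat → Nat → List Int → Nat → Int → Option Int
  | 0, _i, _pending, _start, r => some r   -- fuel = remaining iterations; never exhausted before i = n
  | fuel + 1, i, pending, start, r =>
    if i < n then
      let start' := if start < pending.length ∧ pending.getD start 0 = (i : Int) then start + 1 else start
      let flipped : Bool := (pending.length - start') % 2 == 1
      if (decide (PySem.List.pyGetD S (i : Int) "" = "-")) != flipped then
        if (n : Int) < (i : Int) + K then none
        else altLoop S K n fuel (i + 1) (pending ++ [(i : Int) + K]) start' (r + 1)
      else altLoop S K n fuel (i + 1) pending start' r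
    else some r

def solve_alt (S : List String) (K : Int) : Option Int := altLoop S K S.length S.length 0 [] 0 0

-- ===== PRECONDITION & SPEC =====
-- Pre_solve excludes exactly the inputs on which A does not return: for K ≤ 0 the Python A raises
-- IndexError on S = [] and loops forever when '-' ∈ S; it still returns (0) when S is nonempty
-- without '-', and those inputs stay inside Pre_solve.
def Pre_solve (S : List String) (K : Int) : Prop := 1 ≤ K ∨ (S ≠ [] ∧ "-" ∉ S)
instance (S : List String) (K : Int) : Decidable (Pre_solve S K) := by unfold Pre_solve; infer_instance
def pvWitness_solve : List String × Int := (["-", "+", "-"], 2)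

def Spec_solve (S : List String) (K : Int) (out : Option Int) : Prop := out = solve_alt S K
instance (S : List String) (K : Int) (out : Option Int) : Decidable (Spec_solve S K out) := by unfold Spec_solve; infer_instance

-- ===== CLAIM (what is proved, stated in full; the proofs are below) =====
def Claim_equal_solve : Prop := ∀ (S : List String) (K : Int), Dom_solve S K → Pre_solve S K → Spec_solve S K (solve S K)

-- ===== LEMMAS AND PROOFS =====

-- '-'-test abstraction: a position only matters through whether it holds "-".
def isM (s : String) : Bool := s == "-"
def flipStr (s : String) : String := if s = "-" then "+" else "-"
def flipN (m : Nat) (l : List Bool) : List Bool := (l.take m).map not ++ l.drop m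

lemma length_flipN (m : Nat) (l : List Bool) : (flipN m l).length = l.length := by
  simp [flipN]; omega

-- Reference greedy on the boolean image (true = '-').
def gspec (k : Nat) : List Bool → Option Int
  | [] => some 0
  | false :: t => gspec k t
  | true :: t => if t.length + 1 < k then none else (gspec k (flipN (k - 1) t)).map (· + 1)
termination_by l => l.length
decreasing_by all_goals simp [length_flipN]

lemma gspec_nil (k : Nat) : gspec k [] = some 0 := by simp [gspec]
lemma gspec_false_cons (k : Nat) (t : List Bool) : gspec k (false :: t) = gspec k t := by
  rw [gspec]
lemma gspec_true_cons (k : Nat) (t : List Bool) :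
    gspec k (true :: t) = if t.length + 1 < k then none
      else (gspec k (flipN (k - 1) t)).map (· + 1) := by rw [gspec]

-- effective boolean list given active-flip window offsets (entry e toggles the next e positions)
def eff : List Bool → List Nat → List Bool
  | [], _ => []
  | b :: t, E => (b != decide (E.countP (fun e => decide (1 ≤ e)) % 2 = 1)) :: eff t (E.map (· - 1))

lemma length_eff (t : List Bool) (E : List Nat) : (eff t E).length = t.length := by
  induction t generalizing E with
  | nil => simp [eff]
  | cons b t ih => simp [eff, ih]

lemma eff_nil (t : List Bool) : eff t [] = t := by
  induction t with
  | nil => simp [eff]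
  | cons b t ih => simp [eff, ih]

lemma eff_cons_zero (t : List Bool) (E : List Nat) : eff t (0 :: E) = eff t E := by
  induction t generalizing E with
  | nil => simp [eff]
  | cons b t ih => simp [eff, ih]

lemma flipN_zero (l : List Bool) : flipN 0 l = l := by simp [flipN]

lemma flipN_cons_succ (m : Nat) (b : Bool) (t : List Bool) :
    flipN (m + 1) (b :: t) = (!b) :: flipN m t := by simp [flipN]

lemma eff_snoc (t : List Bool) (E : List Nat) (m : Nat) :
    eff t (E ++ [m]) = flipN m (eff t E) := by
  induction t generalizing E m with
  | nil => simp [eff, flipN]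
  | cons b t ih =>
    simp only [eff, List.countP_append, List.map_append, List.map_cons, List.map_nil]
    cases m with
    | zero =>
      have h0 : List.countP (fun e => decide (1 ≤ e)) [0] = 0 := by decide
      rw [h0, Nat.add_zero, flipN_zero]
      simp only [Nat.zero_sub]
      congr 1
      have := ih (E.map (· - 1)) 0
      rw [flipN_zero] at this
      exact this
    | succ m =>
      have h1 : List.countP (fun e => decide (1 ≤ e)) [m + 1] = 1 := by
        simp
      rw [h1, flipN_cons_succ]
      simp only [Nat.add_sub_cancel, List.cons.injEq]
      refine ⟨?_, ih (E.map (· - 1)) m⟩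
      have hpar : (((List.countP (fun e => decide (1 ≤ e)) E) + 1) % 2 = 1) ↔
          ¬ ((List.countP (fun e => decide (1 ≤ e)) E) % 2 = 1) := by omega
      cases b <;> by_cases hc : (List.countP (fun e => decide (1 ≤ e)) E) % 2 = 1 <;>
        simp [hc, hpar]

lemma gspec_all_false (k : Nat) (l : List Bool) (h : ∀ b ∈ l, b = false) : gspec k l = some 0 := by
  induction l with
  | nil => simp [gspec]
  | cons b t ih =>
    have hb : b = false := h b (by simp)
    subst hb
    rw [gspec_false_cons]
    exact ih (fun b hb => h b (by simp [hb]))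

lemma gspec_false_prefix (k : Nat) (p t : List Bool) (h : ∀ b ∈ p, b = false) :
    gspec k (p ++ t) = gspec k t := by
  induction p with
  | nil => simp
  | cons b p ih =>
    have hb : b = false := h b (by simp)
    subst hb
    rw [List.cons_append, gspec_false_cons]
    exact ih (fun b hb => h b (by simp [hb]))

lemma gspec_short_none (k : Nat) (l : List Bool) (h : l.length < k) (ht : true ∈ l) :
    gspec k l = none := by
  induction l with
  | nil => simp at ht
  | cons b t ih =>
    cases b with
    | false =>
      rw [gspec_false_cons]
      exact ih (by simp at h ⊢; omega) (by simpa using ht)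
    | true =>
      rw [gspec_true_cons, if_pos (by simpa using h)]

lemma getD_append_len {α : Type} [Inhabited α] (A : List α) (b : α) (B : List α) (d : α)
    (k : Nat) (h : A.length = k) : (A ++ b :: B).getD k d = b := by
  subst h
  simp [List.getD_eq_getElem?_getD]

lemma set_append_len {α : Type} (A B : List α) (v : α) (k : Nat) (h : A.length = k) :
    (A ++ B).set k v = A ++ B.set 0 v := by
  subst h
  simp

lemma isM_flipStr (s : String) : isM (flipStr s) = !(isM s) := by
  by_cases h : s = "-" <;> simp [isM, flipStr, h]

lemma flipAux (S : List String) :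
    ∀ k : Nat, flipPrefix S ((k : Nat) : Int) = (S.take k).map flipStr ++ S.drop k := by
  intro k
  induction k with
  | zero =>
    unfold flipPrefix
    rw [show ((0 : Nat) : Int) = 0 by rfl, PySem.List.pyRange_one_eq_nil (by omega)]
    simp
  | succ k ih =>
    unfold flipPrefix at ih ⊢
    rw [show ((k + 1 : Nat) : Int) = (k : Int) + 1 by push_cast; ring,
      PySem.List.pyRange_one_succ_right (by positivity), List.foldl_append, ih]
    simp only [List.foldl_cons, List.foldl_nil]
    by_cases hk : k < S.length
    · have hlenA : ((S.take k).map flipStr).length = k := by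
        simp [Nat.min_eq_left hk.le]
      rw [List.drop_eq_getElem_cons hk, List.take_succ_eq_append_getElem hk]
      generalize S[k] = x
      have hget : PySem.List.pyGetD ((S.take k).map flipStr ++ x :: S.drop (k + 1))
          ((k : Nat) : Int) "" = x := by
        rw [PySem.List.pyGetD_natCast]
        exact getD_append_len _ _ _ _ _ hlenA
      rw [hget, PySem.List.pySetD_natCast, set_append_len _ _ _ _ hlenA]
      simp [flipStr]
    · have h1 : S.length ≤ k := by omega
      rw [List.take_of_length_le h1, List.take_of_length_le (by omega), List.drop_of_length_le h1,
        List.drop_of_length_le (by omega)]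
      simp only [List.append_nil]
      rw [PySem.List.pySetD_natCast, List.set_eq_of_length_le (by simp [h1])]

lemma map_isM_flipPrefix (S : List String) (k : Nat) :
    (flipPrefix S ((k : Nat) : Int)).map isM = flipN k (S.map isM) := by
  rw [flipAux]
  simp [flipN, List.map_take, List.map_drop, List.map_map, Function.comp_def, isM_flipStr]

lemma lemA (K : Int) (hK : 1 ≤ K) :
    ∀ fuel S r, S.length < fuel →
      solveLoop K fuel S r = (gspec K.toNat (S.map isM)).map (· + r) := by
  intro fuel
  induction fuel with
  | zero => intro S r h; omega
  | succ fuel ih =>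
    intro S r hlt
    have hKk : K = ((K.toNat : Nat) : Int) := by omega
    set k := K.toNat with hkdef
    have hk1 : 1 ≤ k := by omega
    show (if K ≤ (S.length : Int) then _ else _) = _
    by_cases hlen : K ≤ (S.length : Int)
    · rw [if_pos hlen]
      obtain ⟨s, t, rfl⟩ : ∃ s t, S = s :: t := by
        cases S with
        | nil => exfalso; simp at hlen; omega
        | cons a b => exact ⟨a, b, rfl⟩
      simp only [List.length_cons] at hlt
      have hklen : k ≤ t.length + 1 := by
        have : (k : Int) ≤ ((s :: t).length : Int) := hKk ▸ hlen
        simp at this; omega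
      by_cases hs : s = "-"
      · -- first element '-': flip, r+1
        simp only [PySem.List.pyGetD_zero_cons, if_pos hs]
        have hS' : flipPrefix (s :: t) K = flipPrefix (s :: t) ((k : Nat) : Int) := by rw [← hKk]
        have hbs' : (flipPrefix (s :: t) K).map isM = flipN k ((s :: t).map isM) := by
          rw [hS', map_isM_flipPrefix]
        have hbs : (s :: t).map isM = true :: t.map isM := by simp [isM, hs]
        have hflip : flipN k (true :: t.map isM) = false :: flipN (k - 1) (t.map isM) := by
          rw [show k = (k - 1) + 1 by omega, flipN_cons_succ]
          simp [show (k - 1 + 1) - 1 = k - 1 by omega]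
        have hgs : gspec k ((s :: t).map isM)
            = (gspec k (flipN (k - 1) (t.map isM))).map (· + 1) := by
          rw [hbs, gspec_true_cons, if_neg (by simp; omega)]
        by_cases hmem : "-" ∈ flipPrefix (s :: t) K
        · rw [if_neg (by simpa using hmem)]
          have hmem' : "-" ∈ flipPrefix (s :: t) K := hmem
          obtain ⟨j, hj⟩ : ∃ j, PySem.List.index? (flipPrefix (s :: t) K) "-" = some j := by
            have := (PySem.List.index?_isSome_iff (xs := flipPrefix (s :: t) K) (v := "-")).2 hmem
            exact Option.isSome_iff_exists.1 this
          rw [hj]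
          show solveLoop K fuel (PySem.List.slice (flipPrefix (s :: t) K) (some (j : Int)) none)
            (r + 1) = _
          obtain ⟨pre, suf, hdec, hjlen, hpre⟩ := (PySem.List.index?_eq_some_iff _ _ _).1 hj
          have hmap : (flipPrefix (s :: t) K).map isM
              = pre.map isM ++ true :: suf.map isM := by
            rw [hdec]; simp [isM]
          have hprene : pre ≠ [] := by
            intro hnil
            rw [hnil] at hmap
            rw [hbs', hbs, hflip] at hmap
            simp at hmap
          have hj1 : 1 ≤ j := by
            cases pre with
            | nil => exact absurd rfl hprene
            | cons a b => simp at hjlen; omega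
          have hlenS' : (flipPrefix (s :: t) K).length = t.length + 1 := by
            rw [hS', flipAux]; simp; omega
          rw [PySem.List.slice_from_natCast]
          have hIH := ih ((flipPrefix (s :: t) K).drop j) (r + 1)
            (by rw [List.length_drop, hlenS']; omega)
          rw [hIH]
          have hdropmap : ((flipPrefix (s :: t) K).drop j).map isM
              = true :: suf.map isM := by
            rw [hdec, ← hjlen, List.drop_left]
            simp [isM]
          have hchain : gspec k (((flipPrefix (s :: t) K).drop j).map isM)
              = gspec k (flipN (k - 1) (t.map isM)) := by
            rw [hdropmap]
            have h2 : gspec k (pre.map isM ++ true :: suf.map isM)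
                = gspec k (true :: suf.map isM) :=
              gspec_false_prefix _ _ _ (by
                intro b hb
                simp only [List.mem_map] at hb
                obtain ⟨x, hx, rfl⟩ := hb
                have : x ≠ "-" := fun h => hpre (h ▸ hx)
                simp [isM, this])
            have h3 : gspec k ((flipPrefix (s :: t) K).map isM)
                = gspec k (flipN (k - 1) (t.map isM)) := by
              rw [hbs', hbs, hflip, gspec_false_cons]
            rw [← h2, ← hmap, h3]
          rw [hchain, hgs]
          cases gspec k (flipN (k - 1) (t.map isM)) <;> simp <;> ring
        · rw [if_pos (by simpa using hmem)]
          have hall : gspec k (flipN (k - 1) (t.map isM)) = some 0 := by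
            apply gspec_all_false
            intro b hb
            have : b ∈ (flipPrefix (s :: t) K).map isM := by
              rw [hbs', hbs, hflip]; simp [hb]
            simp only [List.mem_map] at this
            obtain ⟨x, hx, rfl⟩ := this
            have : x ≠ "-" := fun h => hmem (h ▸ hx)
            simp [isM, this]
          rw [hgs, hall]
          simp
          ring
      · -- first element not '-'
        simp only [PySem.List.pyGetD_zero_cons, if_neg hs]
        have hbs : (s :: t).map isM = false :: t.map isM := by simp [isM, hs]
        by_cases hmem : "-" ∈ s :: t
        · rw [if_neg (by simp only [not_not]; exact hmem)]
          obtain ⟨j, hj⟩ : ∃ j, PySem.List.index? (s :: t) "-" = some j := by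
            have := (PySem.List.index?_isSome_iff (xs := s :: t) (v := "-")).2 hmem
            exact Option.isSome_iff_exists.1 this
          rw [hj]
          show solveLoop K fuel (PySem.List.slice (s :: t) (some (j : Int)) none) r = _
          obtain ⟨pre, suf, hdec, hjlen, hpre⟩ := (PySem.List.index?_eq_some_iff _ _ _).1 hj
          have hprene : pre ≠ [] := by
            intro hnil
            rw [hnil] at hdec
            simp at hdec
            exact hs hdec.1
          have hj1 : 1 ≤ j := by
            cases pre with
            | nil => exact absurd rfl hprene
            | cons a b => simp at hjlen; omega
          rw [PySem.List.slice_from_natCast]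
          have hIH := ih ((s :: t).drop j) r (by simp; omega)
          rw [hIH]
          have hchain : gspec k (((s :: t).drop j).map isM) = gspec k ((s :: t).map isM) := by
            rw [hdec, ← hjlen, List.drop_left]
            have h2 : gspec k ((pre.map isM) ++ (("-" :: suf).map isM))
                = gspec k (("-" :: suf).map isM) :=
              gspec_false_prefix _ _ _ (by
                intro b hb
                simp only [List.mem_map] at hb
                obtain ⟨x, hx, rfl⟩ := hb
                have : x ≠ "-" := fun h => hpre (h ▸ hx)
                simp [isM, this])
            rw [← List.map_append] at h2
            rw [h2]
          rw [hchain]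
        · rw [if_pos (by simpa using hmem)]
          have hall : gspec k ((s :: t).map isM) = some 0 := by
            apply gspec_all_false
            intro b hb
            simp only [List.mem_map] at hb
            obtain ⟨x, hx, rfl⟩ := hb
            have : x ≠ "-" := fun h => hmem (h ▸ hx)
            simp [isM, this]
          rw [hall]
          simp
    · rw [if_neg hlen]
      have hlen' : S.length < k := by
        have : ¬ ((k : Int) ≤ (S.length : Int)) := hKk ▸ hlen
        omega
      by_cases hmem : "-" ∈ S
      · rw [if_pos hmem]
        rw [gspec_short_none k _ (by simpa using hlen')
          (List.mem_map.2 ⟨"-", hmem, by simp [isM]⟩)]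
        simp
      · rw [if_neg hmem]
        rw [gspec_all_false _ _ (by
          intro b hb
          simp only [List.mem_map] at hb
          obtain ⟨x, hx, rfl⟩ := hb
          have : x ≠ "-" := fun h => hmem (h ▸ hx)
          simp [isM, this])]
        simp

lemma offshift (i : Int) (P : List Int) (h : ∀ e ∈ P, i ≤ e) :
    (P.map (fun e => (e - i).toNat)).map (· - 1) = P.map (fun e => (e - (i + 1)).toNat) := by
  rw [List.map_map]
  apply List.map_congr_left
  intro e he
  have := h e he
  simp only [Function.comp_apply]
  omega

lemma beq_mod_decide (n : Nat) : ((n % 2 == 1) : Bool) = decide (n % 2 = 1) := by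
  by_cases h : n % 2 = 1 <;> simp [h]

lemma lemB_go (S : List String) (K : Int) (hK : 1 ≤ K) :
    ∀ fuel i pending start r, S.length - i ≤ fuel →
      start ≤ pending.length →
      ((pending.drop start).Pairwise (· < ·)) →
      (∀ e ∈ pending.drop start, (i : Int) ≤ e ∧ e < (i : Int) + K) →
      altLoop S K S.length fuel i pending start r =
        (gspec K.toNat (eff ((S.map isM).drop i)
          ((pending.drop start).map (fun e => (e - (i : Int)).toNat)))).map (· + r) := by
  intro fuel
  induction fuel with
  | zero =>
    intro i pending start r hfuel _ _ _
    have hni : S.length ≤ i := by omega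
    rw [List.drop_eq_nil_of_le (by simpa using hni)]
    rw [show altLoop S K S.length 0 i pending start r = some r from rfl, show eff []
      ((pending.drop start).map (fun e => (e - (i : Int)).toNat)) = [] from rfl, gspec_nil]
    simp
  | succ fuel ih =>
    intro i pending start r hfuel hstart hpw hbd
    by_cases hi : i < S.length
    case neg =>
      show (if i < S.length then _ else _) = _
      rw [if_neg hi]
      rw [List.drop_eq_nil_of_le (by simp; omega)]
      rw [show eff [] ((pending.drop start).map (fun e => (e - (i : Int)).toNat)) = [] from rfl,
        gspec_nil]
      simp
    case pos =>
      show (if i < S.length then _ else _) = _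
      rw [if_pos hi]
      have hKk : K = ((K.toNat : Nat) : Int) := by omega
      set k := K.toNat with hkdef
      have hgetS : PySem.List.pyGetD S (i : Int) "" = S[i] := by
        simp [List.getD_eq_getElem?_getD, List.getElem?_eq_getElem hi]
      have hdecide : (decide (S[i] = "-")) = isM S[i] := by
        by_cases h : S[i] = "-" <;> simp [isM, h]
      have hdropS : (S.map isM).drop i = isM S[i] :: (S.map isM).drop (i + 1) := by
        rw [List.drop_eq_getElem_cons (by simpa using hi)]
        simp
      -- analyse the pop step
      by_cases hpop : start < pending.length ∧ pending.getD start 0 = (i : Int)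
      case pos =>
        have hP : pending.drop start = (i : Int) :: pending.drop (start + 1) := by
          rw [List.drop_eq_getElem_cons hpop.1]
          congr 1
          have hg : pending.getD start 0 = pending[start] := by
            simp [List.getD_eq_getElem?_getD, List.getElem?_eq_getElem hpop.1]
          exact hg.symm.trans hpop.2
        have hstrict : ∀ e ∈ pending.drop (start + 1), (i : Int) < e := by
          intro e he
          have := (List.pairwise_cons.1 (hP ▸ hpw)).1 e he
          exact this
        have hcnt : List.countP (fun e => decide (1 ≤ e))
            ((pending.drop start).map (fun e => (e - (i : Int)).toNat))
            = pending.length - (start + 1) := by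
          rw [show pending.length - (start + 1) = (pending.drop (start + 1)).length by simp, hP]
          simp only [List.map_cons, List.countP_cons]
          rw [show (((i : Int) - i).toNat) = 0 by omega]
          simp only [show (decide (1 ≤ (0 : Nat))) = false by decide]
          rw [List.countP_eq_length.2]
          · simp
          · intro x hx
            simp only [List.mem_map] at hx
            obtain ⟨e, he, rfl⟩ := hx
            have := hstrict e he
            simp
            omega
        have hshift : eff ((S.map isM).drop (i + 1))
            (((pending.drop start).map (fun e => (e - (i : Int)).toNat)).map (· - 1))
            = eff ((S.map isM).drop (i + 1))
              ((pending.drop (start + 1)).map (fun e => (e - ((i + 1 : Nat) : Int)).toNat)) := by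
          rw [offshift _ _ (fun e he => (hbd e he).1), hP]
          simp only [List.map_cons]
          rw [show (((i : Int) - (i + 1)).toNat) = 0 by omega, eff_cons_zero]
          norm_cast
        simp only [hpop, and_self, if_true, hgetS, hdecide]
        rw [hdropS]
        simp only [eff, hcnt]
        rw [hshift]
        by_cases hbit : (isM S[i] != decide ((pending.length - (start + 1)) % 2 = 1)) = true
        · rw [beq_mod_decide, if_pos hbit, hbit, gspec_true_cons]
          have hlrest : (eff ((S.map isM).drop (i + 1))
              ((pending.drop (start + 1)).map (fun e => (e - ((i + 1 : Nat) : Int)).toNat))).length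
              = S.length - (i + 1) := by
            rw [length_eff]; simp
          by_cases hcond : (S.length : Int) < (i : Int) + K
          · rw [if_pos hcond, if_pos (by rw [hlrest]; omega)]
            rfl
          · rw [if_neg hcond, if_neg (by rw [hlrest]; omega)]
            have hbd2 : ∀ e ∈ (pending ++ [(i : Int) + K]).drop (start + 1),
                ((i + 1 : Nat) : Int) ≤ e ∧ e < ((i + 1 : Nat) : Int) + K := by
              intro e he
              rw [List.drop_append_of_le_length (by omega)] at he
              rcases List.mem_append.1 he with h | h
              · have h1 := hstrict e h
                have h2 := (hbd e (hP ▸ List.mem_cons_of_mem _ h)).2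
                push_cast
                constructor <;> omega
              · simp at h
                subst h
                push_cast
                constructor <;> omega
            have hpw2 : ((pending ++ [(i : Int) + K]).drop (start + 1)).Pairwise (· < ·) := by
              rw [List.drop_append_of_le_length (by omega)]
              apply List.pairwise_append.2
              refine ⟨(List.pairwise_cons.1 (hP ▸ hpw)).2, List.pairwise_singleton _ _, ?_⟩
              intro a ha b hb
              simp at hb
              subst hb
              exact (hbd a (hP ▸ List.mem_cons_of_mem _ ha)).2
            rw [ih (i + 1) (pending ++ [(i : Int) + K]) (start + 1) (r + 1)
              (by omega) (by simp; omega) hpw2 hbd2]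
            rw [List.drop_append_of_le_length (by omega), List.map_append]
            rw [show ([(i : Int) + K].map (fun e => (e - ((i + 1 : Nat) : Int)).toNat))
                = [k - 1] by simp; omega]
            rw [eff_snoc]
            cases gspec k (flipN (k - 1) (eff ((S.map isM).drop (i + 1))
              ((pending.drop (start + 1)).map (fun e => (e - ((i + 1 : Nat) : Int)).toNat)))) <;>
              simp <;> ring
        · rw [beq_mod_decide, if_neg hbit]
          rw [show (isM S[i] != decide ((pending.length - (start + 1)) % 2 = 1))
              = false by simpa using hbit]
          rw [gspec_false_cons]
          rw [ih (i + 1) pending (start + 1) r (by omega) (by omega)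
            (List.pairwise_cons.1 (hP ▸ hpw)).2
            (fun e he => ⟨by have := hstrict e he; push_cast; omega,
              by have := (hbd e (hP ▸ List.mem_cons_of_mem _ he)).2; push_cast; omega⟩)]
      case neg =>
        have hstrict : ∀ e ∈ pending.drop start, (i : Int) < e := by
          rcases Nat.lt_or_ge start pending.length with hlt | hge2
          · have hhead : pending.drop start = pending[start] :: pending.drop (start + 1) :=
              List.drop_eq_getElem_cons hlt
            have hne : pending[start] ≠ (i : Int) := fun hc =>
              hpop ⟨hlt, by rw [List.getD_eq_getElem?_getD, List.getElem?_eq_getElem hlt]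
                            exact hc⟩
            have hheadgt : (i : Int) < pending[start] := by
              have := (hbd pending[start] (by rw [hhead]; exact List.mem_cons_self)).1
              omega
            intro e he
            rw [hhead] at he
            rcases List.mem_cons.1 he with rfl | hmem2
            · exact hheadgt
            · have := (List.pairwise_cons.1 (hhead ▸ hpw)).1 e hmem2
              omega
          · intro e he
            rw [List.drop_eq_nil_of_le hge2] at he
            simp at he
        have hcnt : List.countP (fun e => decide (1 ≤ e))
            ((pending.drop start).map (fun e => (e - (i : Int)).toNat))
            = pending.length - start := by
          rw [show pending.length - start = (pending.drop start).length by simp]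
          rw [List.countP_eq_length.2]
          · simp
          · intro x hx
            simp only [List.mem_map] at hx
            obtain ⟨e, he, rfl⟩ := hx
            have := hstrict e he
            simp
            omega
        have hshift : eff ((S.map isM).drop (i + 1))
            (((pending.drop start).map (fun e => (e - (i : Int)).toNat)).map (· - 1))
            = eff ((S.map isM).drop (i + 1))
              ((pending.drop start).map (fun e => (e - ((i + 1 : Nat) : Int)).toNat)) := by
          rw [offshift _ _ (fun e he => (hbd e he).1)]
          norm_cast
        simp only [hpop, if_false, hgetS, hdecide]
        rw [hdropS]
        simp only [eff, hcnt]
        rw [hshift]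
        by_cases hbit : (isM S[i] != decide ((pending.length - start) % 2 = 1)) = true
        · rw [beq_mod_decide, if_pos hbit, hbit, gspec_true_cons]
          have hlrest : (eff ((S.map isM).drop (i + 1))
              ((pending.drop start).map (fun e => (e - ((i + 1 : Nat) : Int)).toNat))).length
              = S.length - (i + 1) := by
            rw [length_eff]; simp
          by_cases hcond : (S.length : Int) < (i : Int) + K
          · rw [if_pos hcond, if_pos (by rw [hlrest]; omega)]
            rfl
          · rw [if_neg hcond, if_neg (by rw [hlrest]; omega)]
            have hbd2 : ∀ e ∈ (pending ++ [(i : Int) + K]).drop start,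
                ((i + 1 : Nat) : Int) ≤ e ∧ e < ((i + 1 : Nat) : Int) + K := by
              intro e he
              rw [List.drop_append_of_le_length (by omega)] at he
              rcases List.mem_append.1 he with h | h
              · have h1 := hstrict e h
                have h2 := (hbd e h).2
                push_cast
                constructor <;> omega
              · simp at h
                subst h
                push_cast
                constructor <;> omega
            have hpw2 : ((pending ++ [(i : Int) + K]).drop start).Pairwise (· < ·) := by
              rw [List.drop_append_of_le_length (by omega)]
              apply List.pairwise_append.2
              refine ⟨hpw, List.pairwise_singleton _ _, ?_⟩
              intro a ha b hb
              simp at hb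
              subst hb
              exact (hbd a ha).2
            rw [ih (i + 1) (pending ++ [(i : Int) + K]) start (r + 1)
              (by omega) (by simp; omega) hpw2 hbd2]
            rw [List.drop_append_of_le_length (by omega), List.map_append]
            rw [show ([(i : Int) + K].map (fun e => (e - ((i + 1 : Nat) : Int)).toNat))
                = [k - 1] by simp; omega]
            rw [eff_snoc]
            cases gspec k (flipN (k - 1) (eff ((S.map isM).drop (i + 1))
              ((pending.drop start).map (fun e => (e - ((i + 1 : Nat) : Int)).toNat)))) <;>
              simp <;> ring
        · rw [beq_mod_decide, if_neg hbit]
          rw [show (isM S[i] != decide ((pending.length - start) % 2 = 1))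
              = false by simpa using hbit]
          rw [gspec_false_cons]
          rw [ih (i + 1) pending start r (by omega) (by omega) hpw
            (fun e he => ⟨by have := hstrict e he; push_cast; omega,
              by have := (hbd e he).2; push_cast; omega⟩)]

lemma altB_nominus (S : List String) (K : Int) (h : "-" ∉ S) :
    ∀ fuel i r, S.length - i ≤ fuel → altLoop S K S.length fuel i [] 0 r = some r := by
  intro fuel
  induction fuel with
  | zero => intro i r _; rfl
  | succ fuel ih =>
    intro i r hle
    by_cases hi : i < S.length
    · have hget : PySem.List.pyGetD S (i : Int) "" = S[i] := by
        simp [List.getD_eq_getElem?_getD, List.getElem?_eq_getElem hi]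
      have hne : S[i] ≠ "-" := fun hcontra => h (hcontra ▸ List.getElem_mem hi)
      show (if i < S.length then _ else _) = _
      rw [if_pos hi]
      simp only [hget, List.length_nil, Nat.lt_irrefl, false_and, if_false]
      rw [if_neg (by simp [hne])]
      exact ih (i + 1) r (by omega)
    · show (if i < S.length then _ else _) = _
      rw [if_neg hi]

-- ===== VERDICT (by name: the statement is the Claim_ definition above) =====
theorem solve_spec : Claim_equal_solve := by
  unfold Claim_equal_solve Spec_solve
  intro S K _ hpre
  by_cases hK : 1 ≤ K
  · unfold solve solve_alt
    rw [lemA K hK (S.length + 1) S 0 (by omega)]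
    rw [lemB_go S K hK S.length 0 [] 0 0 (by omega) (by simp) (by simp) (by simp)]
    simp [eff_nil]
  · rcases hpre with h1 | ⟨hne, hnm⟩
    · omega
    · obtain ⟨s, t, rfl⟩ : ∃ s t, S = s :: t := by
        cases S with
        | nil => exact absurd rfl hne
        | cons a b => exact ⟨a, b, rfl⟩
      have hs : ¬ s = "-" := fun h => hnm (h ▸ List.mem_cons_self)
      unfold solve
      show (if K ≤ (((s :: t).length : Nat) : Int) then _ else _) = _
      rw [if_pos (by omega)]
      simp only [PySem.List.pyGetD_zero_cons, if_neg hs]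
      rw [if_pos hnm]
      unfold solve_alt
      rw [altB_nominus (s :: t) K hnm (s :: t).length 0 0 (by omega)]
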